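-- pv_equiv track=rewrite | github.com/devendra104/log_analyzer_tool | dashboard/utils/common.py | combining_alternate_element
-- ===== SOURCE A (Python) =====
-- def combining_alternate_element(log):
--     """
--     This method use to collect the record from the system logs,
--     the odd selection help to remove the null after every time slots.
--     example: [DEBUG 2019-08-25T15:19:18 main] Hook /usr/sh
--     combine result.
--     :param list log:
--
--     :return:log_list
--     """
--     log_list = []
--     count = 0
--     temp = ""
--     for content in log:
--         if count % 2 == 0:
--             temp = content
--         else:
--             temp = temp + content
--             log_list.append(temp)
--             temp = ""
--         count += 1
--     return log_list
-- ===== SOURCE B (Python) =====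
-- def combining_alternate_element(log):
--     it = iter(log)
--     return [even + odd for even, odd in zip(it, it)]
-- ===== Notes on version B (the rewrite author's own statement) =====
-- stated objective: idiomatic
-- what changed: Replaced the stateful parity-counter loop with a temp accumulator by pairing the list two-at-a-time via zip over one iterator and a comprehension.
import Mathlib
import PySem

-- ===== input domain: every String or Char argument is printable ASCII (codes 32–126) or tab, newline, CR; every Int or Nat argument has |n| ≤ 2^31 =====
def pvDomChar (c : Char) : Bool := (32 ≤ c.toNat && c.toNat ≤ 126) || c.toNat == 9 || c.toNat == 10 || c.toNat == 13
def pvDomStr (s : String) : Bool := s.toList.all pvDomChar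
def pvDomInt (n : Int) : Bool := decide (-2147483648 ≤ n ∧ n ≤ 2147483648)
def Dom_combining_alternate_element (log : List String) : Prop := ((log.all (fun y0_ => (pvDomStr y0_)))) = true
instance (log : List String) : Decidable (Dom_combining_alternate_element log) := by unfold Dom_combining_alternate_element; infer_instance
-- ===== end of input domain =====

-- B replaces A's parity-counter loop with zip(it, it) pairwise grouping (idiomatic, same cost); equivalence proved for all inputs.


-- ===== PORT A =====
-- Loop state: (log_list, count, temp), exactly A's variables.
def combining_alternate_element (log : List String) : List String :=
  (log.foldl
    (fun (s : List String × Int × String) content =>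
      let log_list := s.1
      let count := s.2.1
      let temp := s.2.2
      if count % 2 == 0 then
        (log_list, count + 1, content)
      else
        (log_list ++ [temp ++ content], count + 1, ""))
    ([], 0, "")).1

-- ===== PORT B =====
-- B pairs the list two at a time (zip(it, it)) and concatenates each pair.
def combining_alternate_element_alt : List String → List String
  | even :: odd :: rest => (even ++ odd) :: combining_alternate_element_alt rest
  | _ => []

-- ===== PRECONDITION & SPEC =====
def Spec_combining_alternate_element (log : List String) (out : List String) : Prop := out = combining_alternate_element_alt log
instance (log : List String) (out : List String) : Decidable (Spec_combining_alternate_element log out) := by unfold Spec_combining_alternate_element; infer_instance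

-- ===== CLAIM (what is proved, stated in full; the proofs are below) =====
def Claim_equal_combining_alternate_element : Prop := ∀ (log : List String), Dom_combining_alternate_element log → Spec_combining_alternate_element log (combining_alternate_element log)

-- ===== LEMMAS AND PROOFS =====

-- ===== VERDICT (by name: the statement is the Claim_ definition above) =====
lemma pvFold_pairs : ∀ (log acc : List String) (k : Int) (temp : String), k % 2 = 0 →
    (log.foldl
      (fun (s : List String × Int × String) content =>
        let log_list := s.1
        let count := s.2.1
        let temp := s.2.2
        if count % 2 == 0 then
          (log_list, count + 1, content)
        else
          (log_list ++ [temp ++ content], count + 1, ""))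
      (acc, k, temp)).1 = acc ++ combining_alternate_element_alt log := by
  intro log
  induction log using combining_alternate_element_alt.induct with
  | case1 even odd rest ih =>
      intro acc k temp hk
      have h1 : (k % 2 == 0) = true := by simp; omega
      have h2 : ¬ ((k + 1) % 2 == 0) = true := by simp; omega
      simp only [List.foldl]
      rw [if_pos h1, if_neg h2]
      rw [ih (acc ++ [even ++ odd]) (k + 1 + 1) "" (by omega)]
      simp [combining_alternate_element_alt]
  | case2 xs h =>
      intro acc k temp hk
      rcases xs with _ | ⟨x, _ | ⟨y, r⟩⟩
      · simp [combining_alternate_element_alt]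
      · have h1 : (k % 2 == 0) = true := by simp; omega
        simp only [List.foldl]
        rw [if_pos h1]
        simp [combining_alternate_element_alt]
      · exact absurd rfl (h x y r)

theorem combining_alternate_element_spec : Claim_equal_combining_alternate_element := by
  intro log _
  unfold Spec_combining_alternate_element combining_alternate_element
  rw [pvFold_pairs log [] 0 "" (by omega)]
  simp
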